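-- pv_equiv track=rewrite | github.com/yukkiball/Python-Algorithm | 查找/二分查找.py | search_rec
-- ===== SOURCE A (Python) =====
-- def search_rec(list, x, lo, hi):
--     """递归版二分查找返回小于等于该元素的最大秩"""
--     if lo > hi:
--         return lo - 1
--     mid = (lo + hi) // 2
--     # if list[mid] > x:
--     #     return search_rec(list, x, lo, mid - 1)
--     # elif list[mid] < x:
--     #     return search_rec(list, x, mid + 1, hi)
--     # else:
--     #     return mid
--     if list[mid] > x:
--         return search_rec(list, x, lo, mid - 1)
--     else:
--         return search_rec(list, x, mid + 1, hi)
-- ===== SOURCE B (Python) =====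
-- def search_rec(list, x, lo, hi):
--     """Iterative binary search keeping a best-so-far answer accumulator."""
--     ans = lo - 1
--     while lo <= hi:
--         mid = (lo + hi) // 2
--         if list[mid] > x:
--             hi = mid - 1
--         else:
--             ans = mid
--             lo = mid + 1
--     return ans
-- ===== Notes on version B (the rewrite author's own statement) =====
-- stated objective: simpler
-- what changed: Replaces the recursive halving (one stack frame per step, answer reconstructed as lo-1 at the base case) with an iterative while-loop that records the best index found so far in an 'ans' accumulator and returns it once.
-- outside the precondition, e.g. on search_rec([1, 2, 3], 10, -4, 2): A returns 2, B returns 2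
import Mathlib
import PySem

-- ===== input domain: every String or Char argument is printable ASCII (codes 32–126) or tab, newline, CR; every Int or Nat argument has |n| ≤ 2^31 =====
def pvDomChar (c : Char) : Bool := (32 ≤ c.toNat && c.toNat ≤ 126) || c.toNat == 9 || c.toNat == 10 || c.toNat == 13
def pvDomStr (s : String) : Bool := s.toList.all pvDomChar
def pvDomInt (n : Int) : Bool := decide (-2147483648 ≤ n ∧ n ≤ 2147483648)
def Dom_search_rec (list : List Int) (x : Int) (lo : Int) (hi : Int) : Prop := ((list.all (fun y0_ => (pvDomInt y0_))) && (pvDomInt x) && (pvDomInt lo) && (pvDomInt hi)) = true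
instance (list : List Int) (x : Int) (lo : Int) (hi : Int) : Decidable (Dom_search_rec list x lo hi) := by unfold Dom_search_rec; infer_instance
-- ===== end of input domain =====

-- B replaces A's recursion by an iterative loop keeping a best-so-far answer accumulator (simpler, O(1) space).

-- ===== PORT A =====
def search_rec (list : List Int) (x : Int) (lo : Int) (hi : Int) : Int :=
  if lo > hi then lo - 1
  else
    let mid := PySem.Int.floordiv (lo + hi) 2
    if PySem.List.pyGetD list mid 0 > x then
      search_rec list x lo (mid - 1)
    else
      search_rec list x (mid + 1) hi
termination_by (hi - lo + 1).toNat
decreasing_by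
  · have h := PySem.Int.floordiv_two_mid_bounds (lo := lo) (hi := hi) (by omega)
    omega
  · have h := PySem.Int.floordiv_two_mid_bounds (lo := lo) (hi := hi) (by omega)
    omega

-- ===== PORT B =====
-- the while-loop of Source B, ported with a fuel counter that bounds the number of iterations;
-- state is (ans, lo, hi) and the result is the accumulator ans
def searchIter (list : List Int) (x : Int) : Nat → Int → Int → Int → Int
  | 0, ans, _, _ => ans
  | fuel + 1, ans, lo, hi =>
    if lo ≤ hi then
      let mid := PySem.Int.floordiv (lo + hi) 2
      if PySem.List.pyGetD list mid 0 > x then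
        searchIter list x fuel ans lo (mid - 1)
      else
        searchIter list x fuel mid (mid + 1) hi
    else ans

def search_rec_alt (list : List Int) (x : Int) (lo : Int) (hi : Int) : Int :=
  searchIter list x (hi - lo + 1).toNat (lo - 1) lo hi

-- ===== PRECONDITION & SPEC =====
-- Pre_ excludes out-of-bounds lo/hi windows on which evaluation reaches an index outside
-- [-len, len) and Python raises IndexError; a few such windows happen to return via Python's
-- negative-index wraparound before escaping (e.g. ([1,2,3], 10, -4, 2)), and B returns the
-- same value there.
def Pre_search_rec (list : List Int) (x : Int) (lo : Int) (hi : Int) : Prop :=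
  lo > hi ∨ (-(list.length : Int) ≤ lo ∧ hi < (list.length : Int))
instance (list : List Int) (x : Int) (lo : Int) (hi : Int) : Decidable (Pre_search_rec list x lo hi) := by unfold Pre_search_rec; infer_instance

def pvWitness_search_rec : List Int × Int × Int × Int := ([1, 2, 3], 2, 0, 2)

def Spec_search_rec (list : List Int) (x : Int) (lo : Int) (hi : Int) (out : Int) : Prop := out = search_rec_alt list x lo hi
instance (list : List Int) (x : Int) (lo : Int) (hi : Int) (out : Int) : Decidable (Spec_search_rec list x lo hi out) := by unfold Spec_search_rec; infer_instance

-- ===== CLAIM (what is proved, stated in full; the proofs are below) =====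
def Claim_equal_search_rec : Prop := ∀ (list : List Int) (x : Int) (lo : Int) (hi : Int), Dom_search_rec list x lo hi → Pre_search_rec list x lo hi → Spec_search_rec list x lo hi (search_rec list x lo hi)

-- ===== LEMMAS AND PROOFS =====
-- any fuel ≥ the window size runs the loop to completion, and the accumulator lo-1
-- tracks A's recursion
theorem searchIter_eq (list : List Int) (x : Int) :
    ∀ (fuel : Nat) (lo hi : Int), (hi - lo + 1).toNat ≤ fuel →
      searchIter list x fuel (lo - 1) lo hi = search_rec list x lo hi := by
  intro fuel
  induction fuel with
  | zero =>
      intro lo hi hf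
      have hlt : lo > hi := by omega
      rw [search_rec]
      simp [searchIter, hlt]
  | succ n ih =>
      intro lo hi hf
      rw [search_rec, searchIter]
      by_cases hle : lo ≤ hi
      · have hmid := PySem.Int.floordiv_two_mid_bounds (lo := lo) (hi := hi) hle
        simp only [hle, if_true, show ¬ lo > hi by omega, if_false]
        by_cases hgt : PySem.List.pyGetD list (PySem.Int.floordiv (lo + hi) 2) 0 > x
        · rw [if_pos hgt, if_pos hgt]
          exact ih lo (PySem.Int.floordiv (lo + hi) 2 - 1) (by omega)
        · rw [if_neg hgt, if_neg hgt]
          have := ih (PySem.Int.floordiv (lo + hi) 2 + 1) hi (by omega)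
          simpa using this
      · simp [hle, show lo > hi by omega]

-- ===== VERDICT (by name: the statement is the Claim_ definition above) =====
theorem search_rec_spec : Claim_equal_search_rec := by
  intro list x lo hi _ _
  unfold Spec_search_rec search_rec_alt
  exact (searchIter_eq list x _ lo hi le_rfl).symm
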